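-- pv_equiv track=rewrite | github.com/ishaan-bit/leo | enrichment-worker/scripts/generate_taxonomy.py | assign_tier
-- ===== SOURCE A (Python) =====
-- def assign_tier(core, nuance, micro):
--     """
--     Assign tier (A/B/C) based on clinical priority and commonality.
--
--     Tier A (60 cells): Most common in urban India women 25-35
--     Tier B (100 cells): Moderately common
--     Tier C (56 cells): Rare or extreme states
--     """
--
--     # TIER A (60 cells) - High Priority
--     tier_a_patterns = [
--         # Sad branch (most common)
--         ("Sad", "Lonely", ["Abandoned", "Isolated", "Forsaken", "Forgotten", "Alone"]),
--         ("Sad", "Depressed", ["Hopeless", "Empty", "Low", "Exhausted", "Despairing"]),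
--         ("Sad", "Hurt", ["Wounded", "Pained", "Aching"]),
--         ("Sad", "Vulnerable", ["Exposed", "Fragile", "Unsafe"]),
--         ("Sad", "Guilty", ["Ashamed", "Regretful", "Embarrassed"]),
--
--         # Fearful branch (anxiety epidemic)
--         ("Fearful", "Anxious", ["Nervous", "Uneasy", "Tense", "Worried", "Restless", "Alarmed"]),
--         ("Fearful", "Overwhelmed", ["Stressed", "Exhausted", "Flooded", "Pressured", "Burdened"]),
--         ("Fearful", "Insecure", ["Uncertain", "Self-doubting", "Hesitant"]),
--         ("Fearful", "Rejected", ["Excluded", "Neglected", "Abandoned"]),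
--
--         # Angry branch (relationship conflicts)
--         ("Angry", "Frustrated", ["Annoyed", "Impatient", "Restless", "Defeated", "Irritated"]),
--         ("Angry", "Disappointed", ["Betrayed", "Let-down", "Resentful"]),
--         ("Angry", "Humiliated", ["Ashamed", "Inferior", "Embarrassed", "Belittled"]),
--
--         # Peaceful branch (positive affect)
--         ("Peaceful", "Grateful", ["Thankful", "Appreciative", "Blessed", "Content"]),
--         ("Peaceful", "Content", ["Comfortable", "Satisfied", "Calm", "At-ease"]),
--         ("Peaceful", "Serene", ["Tranquil", "Relaxed", "Balanced"]),
--
--         # Happy branch (positive but guarded)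
--         ("Happy", "Optimistic", ["Hopeful", "Positive"]),
--         ("Happy", "Interested", ["Engaged", "Curious"]),
--
--         # Strong branch (resilience)
--         ("Strong", "Resilient", ["Tough", "Steady", "Enduring", "Adaptable"]),
--         ("Strong", "Hopeful", ["Inspired", "Aspiring", "Reassured"]),
--         ("Strong", "Confident", ["Assured", "Capable"]),
--     ]
--
--     # TIER C (56 cells) - Low Priority / Rare
--     tier_c_patterns = [
--         # Extreme positive (rare in distress-focused journaling)
--         ("Happy", "Excited", ["Energetic", "Stimulated", "Inspired", "Cheerful"]),
--         ("Happy", "Playful", ["Fun", "Lighthearted", "Amused", "Silly", "Jovial"]),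
--         ("Happy", "Creative", "Imaginative", "Inventive", "Visionary", "Experimental"),
--
--         # Extreme negative / sociopathic
--         ("Angry", "Aggressive", ["Provoked", "Violent", "Hostile", "Combative", "Threatening"]),
--         ("Angry", "Critical", ["Dismissive", "Judgmental", "Harsh", "Skeptical", "Sarcastic"]),
--         ("Sad", "Grief", ["Mourning", "Bereaved", "Sorrowful", "Heartbroken"]),
--         ("Fearful", "Weak", ["Powerless", "Fragile", "Small", "Ineffective"]),
--         ("Fearful", "Helpless", ["Worthless", "Defeated", "Stuck", "Lost", "Hopeless", "Paralyzed"]),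
--
--         # Rare strong states
--         ("Strong", "Proud", ["Accomplished", "Honored", "Esteemed", "Fulfilled"]),
--         ("Strong", "Respected", ["Valued", "Trusted", "Admired", "Recognized"]),
--         ("Strong", "Courageous", ["Brave", "Adventurous", "Daring", "Fearless"]),
--     ]
--
--     # Check Tier A
--     for pattern in tier_a_patterns:
--         if len(pattern) == 3:
--             p_core, p_nuance, p_micros = pattern
--             if core == p_core and nuance == p_nuance and micro in p_micros:
--                 return "A"
--
--     # Check Tier C
--     for pattern in tier_c_patterns:
--         if len(pattern) == 3:
--             p_core, p_nuance, p_micros = pattern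
--             if core == p_core and nuance == p_nuance:
--                 if isinstance(p_micros, list) and micro in p_micros:
--                     return "C"
--                 elif isinstance(p_micros, str) and micro == p_micros:
--                     return "C"
--
--     # Default: Tier B (everything else)
--     return "B"
-- ===== SOURCE B (Python) =====
-- # B replaces A's runtime scans over pattern-tuple lists by a hard-coded decision tree:
-- # dispatch on core, then on nuance, then a micro membership test -- no pattern tables exist at runtime.
--
-- def _sad(nuance, micro):
--     if nuance == "Lonely":
--         return "A" if micro in ("Abandoned", "Isolated", "Forsaken", "Forgotten", "Alone") else "B"
--     if nuance == "Depressed":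
--         return "A" if micro in ("Hopeless", "Empty", "Low", "Exhausted", "Despairing") else "B"
--     if nuance == "Hurt":
--         return "A" if micro in ("Wounded", "Pained", "Aching") else "B"
--     if nuance == "Vulnerable":
--         return "A" if micro in ("Exposed", "Fragile", "Unsafe") else "B"
--     if nuance == "Guilty":
--         return "A" if micro in ("Ashamed", "Regretful", "Embarrassed") else "B"
--     if nuance == "Grief":
--         return "C" if micro in ("Mourning", "Bereaved", "Sorrowful", "Heartbroken") else "B"
--     return "B"
--
-- def _fearful(nuance, micro):
--     if nuance == "Anxious":
--         return "A" if micro in ("Nervous", "Uneasy", "Tense", "Worried", "Restless", "Alarmed") else "B"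
--     if nuance == "Overwhelmed":
--         return "A" if micro in ("Stressed", "Exhausted", "Flooded", "Pressured", "Burdened") else "B"
--     if nuance == "Insecure":
--         return "A" if micro in ("Uncertain", "Self-doubting", "Hesitant") else "B"
--     if nuance == "Rejected":
--         return "A" if micro in ("Excluded", "Neglected", "Abandoned") else "B"
--     if nuance == "Weak":
--         return "C" if micro in ("Powerless", "Fragile", "Small", "Ineffective") else "B"
--     if nuance == "Helpless":
--         return "C" if micro in ("Worthless", "Defeated", "Stuck", "Lost", "Hopeless", "Paralyzed") else "B"
--     return "B"
--
-- def _angry(nuance, micro):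
--     if nuance == "Frustrated":
--         return "A" if micro in ("Annoyed", "Impatient", "Restless", "Defeated", "Irritated") else "B"
--     if nuance == "Disappointed":
--         return "A" if micro in ("Betrayed", "Let-down", "Resentful") else "B"
--     if nuance == "Humiliated":
--         return "A" if micro in ("Ashamed", "Inferior", "Embarrassed", "Belittled") else "B"
--     if nuance == "Aggressive":
--         return "C" if micro in ("Provoked", "Violent", "Hostile", "Combative", "Threatening") else "B"
--     if nuance == "Critical":
--         return "C" if micro in ("Dismissive", "Judgmental", "Harsh", "Skeptical", "Sarcastic") else "B"
--     return "B"
--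
-- def _peaceful(nuance, micro):
--     if nuance == "Grateful":
--         return "A" if micro in ("Thankful", "Appreciative", "Blessed", "Content") else "B"
--     if nuance == "Content":
--         return "A" if micro in ("Comfortable", "Satisfied", "Calm", "At-ease") else "B"
--     if nuance == "Serene":
--         return "A" if micro in ("Tranquil", "Relaxed", "Balanced") else "B"
--     return "B"
--
-- def _happy(nuance, micro):
--     if nuance == "Optimistic":
--         return "A" if micro in ("Hopeful", "Positive") else "B"
--     if nuance == "Interested":
--         return "A" if micro in ("Engaged", "Curious") else "B"
--     if nuance == "Excited":
--         return "C" if micro in ("Energetic", "Stimulated", "Inspired", "Cheerful") else "B"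
--     if nuance == "Playful":
--         return "C" if micro in ("Fun", "Lighthearted", "Amused", "Silly", "Jovial") else "B"
--     # ("Happy", "Creative") is dead data in the source patterns (malformed tuple): tier B.
--     return "B"
--
-- def _strong(nuance, micro):
--     if nuance == "Resilient":
--         return "A" if micro in ("Tough", "Steady", "Enduring", "Adaptable") else "B"
--     if nuance == "Hopeful":
--         return "A" if micro in ("Inspired", "Aspiring", "Reassured") else "B"
--     if nuance == "Confident":
--         return "A" if micro in ("Assured", "Capable") else "B"
--     if nuance == "Proud":
--         return "C" if micro in ("Accomplished", "Honored", "Esteemed", "Fulfilled") else "B"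
--     if nuance == "Respected":
--         return "C" if micro in ("Valued", "Trusted", "Admired", "Recognized") else "B"
--     if nuance == "Courageous":
--         return "C" if micro in ("Brave", "Adventurous", "Daring", "Fearless") else "B"
--     return "B"
--
-- def assign_tier(core, nuance, micro):
--     if core == "Sad":
--         return _sad(nuance, micro)
--     if core == "Fearful":
--         return _fearful(nuance, micro)
--     if core == "Angry":
--         return _angry(nuance, micro)
--     if core == "Peaceful":
--         return _peaceful(nuance, micro)
--     if core == "Happy":
--         return _happy(nuance, micro)
--     if core == "Strong":
--         return _strong(nuance, micro)
--     return "B"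
-- ===== Notes on version B (the rewrite author's own statement) =====
-- stated objective: alternative
-- what changed: Replaced A's two runtime scans over pattern-tuple lists (with len/isinstance guards) by a hard-coded two-level decision tree of conditionals: dispatch on core to a per-core helper, then on nuance, then one micro membership test; no pattern tables exist at runtime.
import Mathlib
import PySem

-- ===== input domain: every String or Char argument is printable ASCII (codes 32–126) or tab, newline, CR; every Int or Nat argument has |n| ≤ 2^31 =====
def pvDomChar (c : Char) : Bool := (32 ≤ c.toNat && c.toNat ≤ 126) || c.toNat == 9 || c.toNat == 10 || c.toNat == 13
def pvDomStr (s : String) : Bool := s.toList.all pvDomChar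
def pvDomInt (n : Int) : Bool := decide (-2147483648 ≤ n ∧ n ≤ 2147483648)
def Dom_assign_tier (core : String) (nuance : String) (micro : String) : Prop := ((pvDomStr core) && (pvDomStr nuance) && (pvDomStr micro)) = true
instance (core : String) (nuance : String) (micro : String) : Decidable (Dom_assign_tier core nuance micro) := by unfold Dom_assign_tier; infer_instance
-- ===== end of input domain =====

-- B replaces A's runtime scans over pattern-tuple lists by a hard-coded decision tree (dispatch on core, then nuance, then micro membership); alternative structure, same exact return value.
-- ===== PORT A =====

-- The tier-C pattern list mixes 3-tuples (micros a list) with one malformed 6-tuple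
-- ("Happy","Creative",...); A's `len(pattern) == 3` guard skips the 6-tuple. The port keeps both
-- shapes as constructors and the guard as the match on the constructor. A's `isinstance(..., str)`
-- branch is kept as the MicroVal.str constructor (unused by the concrete data, ported faithfully).
inductive MicroVal where
  | lst : List String → MicroVal
  | str : String → MicroVal
deriving Repr, DecidableEq

inductive CPattern where
  | p3 : String → String → MicroVal → CPattern
  | p6 : String → String → String → String → String → String → CPattern
deriving Repr, DecidableEq

def tierAPatterns : List (String × String × List String) := [
  ("Sad", "Lonely", ["Abandoned", "Isolated", "Forsaken", "Forgotten", "Alone"]),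
  ("Sad", "Depressed", ["Hopeless", "Empty", "Low", "Exhausted", "Despairing"]),
  ("Sad", "Hurt", ["Wounded", "Pained", "Aching"]),
  ("Sad", "Vulnerable", ["Exposed", "Fragile", "Unsafe"]),
  ("Sad", "Guilty", ["Ashamed", "Regretful", "Embarrassed"]),
  ("Fearful", "Anxious", ["Nervous", "Uneasy", "Tense", "Worried", "Restless", "Alarmed"]),
  ("Fearful", "Overwhelmed", ["Stressed", "Exhausted", "Flooded", "Pressured", "Burdened"]),
  ("Fearful", "Insecure", ["Uncertain", "Self-doubting", "Hesitant"]),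
  ("Fearful", "Rejected", ["Excluded", "Neglected", "Abandoned"]),
  ("Angry", "Frustrated", ["Annoyed", "Impatient", "Restless", "Defeated", "Irritated"]),
  ("Angry", "Disappointed", ["Betrayed", "Let-down", "Resentful"]),
  ("Angry", "Humiliated", ["Ashamed", "Inferior", "Embarrassed", "Belittled"]),
  ("Peaceful", "Grateful", ["Thankful", "Appreciative", "Blessed", "Content"]),
  ("Peaceful", "Content", ["Comfortable", "Satisfied", "Calm", "At-ease"]),
  ("Peaceful", "Serene", ["Tranquil", "Relaxed", "Balanced"]),
  ("Happy", "Optimistic", ["Hopeful", "Positive"]),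
  ("Happy", "Interested", ["Engaged", "Curious"]),
  ("Strong", "Resilient", ["Tough", "Steady", "Enduring", "Adaptable"]),
  ("Strong", "Hopeful", ["Inspired", "Aspiring", "Reassured"]),
  ("Strong", "Confident", ["Assured", "Capable"])]

def tierCPatterns : List CPattern := [
  .p3 "Happy" "Excited" (.lst ["Energetic", "Stimulated", "Inspired", "Cheerful"]),
  .p3 "Happy" "Playful" (.lst ["Fun", "Lighthearted", "Amused", "Silly", "Jovial"]),
  .p6 "Happy" "Creative" "Imaginative" "Inventive" "Visionary" "Experimental",
  .p3 "Angry" "Aggressive" (.lst ["Provoked", "Violent", "Hostile", "Combative", "Threatening"]),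
  .p3 "Angry" "Critical" (.lst ["Dismissive", "Judgmental", "Harsh", "Skeptical", "Sarcastic"]),
  .p3 "Sad" "Grief" (.lst ["Mourning", "Bereaved", "Sorrowful", "Heartbroken"]),
  .p3 "Fearful" "Weak" (.lst ["Powerless", "Fragile", "Small", "Ineffective"]),
  .p3 "Fearful" "Helpless" (.lst ["Worthless", "Defeated", "Stuck", "Lost", "Hopeless", "Paralyzed"]),
  .p3 "Strong" "Proud" (.lst ["Accomplished", "Honored", "Esteemed", "Fulfilled"]),
  .p3 "Strong" "Respected" (.lst ["Valued", "Trusted", "Admired", "Recognized"]),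
  .p3 "Strong" "Courageous" (.lst ["Brave", "Adventurous", "Daring", "Fearless"])]

-- the `for pattern in tier_c_patterns` loop; falls through to `return "B"` at the end
def tierCLoop (core nuance micro : String) : List CPattern → String
  | [] => "B"
  | .p3 pc pn pm :: rest =>
      if core = pc ∧ nuance = pn then
        match pm with
        | .lst l => if micro ∈ l then "C" else tierCLoop core nuance micro rest
        | .str s => if micro = s then "C" else tierCLoop core nuance micro rest
      else tierCLoop core nuance micro rest
  | .p6 _ _ _ _ _ _ :: rest => tierCLoop core nuance micro rest  -- len(pattern) == 6 ≠ 3: skipped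

-- the `for pattern in tier_a_patterns` loop (every tier-A tuple has length 3, so the
-- `len(pattern) == 3` guard is always true there); falls through to the tier-C loop
def tierALoop (core nuance micro : String) : List (String × String × List String) → String
  | [] => tierCLoop core nuance micro tierCPatterns
  | (pc, pn, pm) :: rest =>
      if core = pc ∧ nuance = pn ∧ micro ∈ pm then "A"
      else tierALoop core nuance micro rest

def assign_tier (core : String) (nuance : String) (micro : String) : String :=
  tierALoop core nuance micro tierAPatterns

-- ===== PORT B =====
def sadTier (nuance : String) (micro : String) : String :=
  if nuance = "Lonely" then (if micro ∈ (["Abandoned", "Isolated", "Forsaken", "Forgotten", "Alone"] : List String) then "A" else "B")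
  else
  if nuance = "Depressed" then (if micro ∈ (["Hopeless", "Empty", "Low", "Exhausted", "Despairing"] : List String) then "A" else "B")
  else
  if nuance = "Hurt" then (if micro ∈ (["Wounded", "Pained", "Aching"] : List String) then "A" else "B")
  else
  if nuance = "Vulnerable" then (if micro ∈ (["Exposed", "Fragile", "Unsafe"] : List String) then "A" else "B")
  else
  if nuance = "Guilty" then (if micro ∈ (["Ashamed", "Regretful", "Embarrassed"] : List String) then "A" else "B")
  else
  if nuance = "Grief" then (if micro ∈ (["Mourning", "Bereaved", "Sorrowful", "Heartbroken"] : List String) then "C" else "B")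
  else
  "B"

def fearfulTier (nuance : String) (micro : String) : String :=
  if nuance = "Anxious" then (if micro ∈ (["Nervous", "Uneasy", "Tense", "Worried", "Restless", "Alarmed"] : List String) then "A" else "B")
  else
  if nuance = "Overwhelmed" then (if micro ∈ (["Stressed", "Exhausted", "Flooded", "Pressured", "Burdened"] : List String) then "A" else "B")
  else
  if nuance = "Insecure" then (if micro ∈ (["Uncertain", "Self-doubting", "Hesitant"] : List String) then "A" else "B")
  else
  if nuance = "Rejected" then (if micro ∈ (["Excluded", "Neglected", "Abandoned"] : List String) then "A" else "B")
  else
  if nuance = "Weak" then (if micro ∈ (["Powerless", "Fragile", "Small", "Ineffective"] : List String) then "C" else "B")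
  else
  if nuance = "Helpless" then (if micro ∈ (["Worthless", "Defeated", "Stuck", "Lost", "Hopeless", "Paralyzed"] : List String) then "C" else "B")
  else
  "B"

def angryTier (nuance : String) (micro : String) : String :=
  if nuance = "Frustrated" then (if micro ∈ (["Annoyed", "Impatient", "Restless", "Defeated", "Irritated"] : List String) then "A" else "B")
  else
  if nuance = "Disappointed" then (if micro ∈ (["Betrayed", "Let-down", "Resentful"] : List String) then "A" else "B")
  else
  if nuance = "Humiliated" then (if micro ∈ (["Ashamed", "Inferior", "Embarrassed", "Belittled"] : List String) then "A" else "B")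
  else
  if nuance = "Aggressive" then (if micro ∈ (["Provoked", "Violent", "Hostile", "Combative", "Threatening"] : List String) then "C" else "B")
  else
  if nuance = "Critical" then (if micro ∈ (["Dismissive", "Judgmental", "Harsh", "Skeptical", "Sarcastic"] : List String) then "C" else "B")
  else
  "B"

def peacefulTier (nuance : String) (micro : String) : String :=
  if nuance = "Grateful" then (if micro ∈ (["Thankful", "Appreciative", "Blessed", "Content"] : List String) then "A" else "B")
  else
  if nuance = "Content" then (if micro ∈ (["Comfortable", "Satisfied", "Calm", "At-ease"] : List String) then "A" else "B")
  else
  if nuance = "Serene" then (if micro ∈ (["Tranquil", "Relaxed", "Balanced"] : List String) then "A" else "B")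
  else
  "B"

def happyTier (nuance : String) (micro : String) : String :=
  if nuance = "Optimistic" then (if micro ∈ (["Hopeful", "Positive"] : List String) then "A" else "B")
  else
  if nuance = "Interested" then (if micro ∈ (["Engaged", "Curious"] : List String) then "A" else "B")
  else
  if nuance = "Excited" then (if micro ∈ (["Energetic", "Stimulated", "Inspired", "Cheerful"] : List String) then "C" else "B")
  else
  if nuance = "Playful" then (if micro ∈ (["Fun", "Lighthearted", "Amused", "Silly", "Jovial"] : List String) then "C" else "B")
  else
  "B"

def strongTier (nuance : String) (micro : String) : String :=
  if nuance = "Resilient" then (if micro ∈ (["Tough", "Steady", "Enduring", "Adaptable"] : List String) then "A" else "B")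
  else
  if nuance = "Hopeful" then (if micro ∈ (["Inspired", "Aspiring", "Reassured"] : List String) then "A" else "B")
  else
  if nuance = "Confident" then (if micro ∈ (["Assured", "Capable"] : List String) then "A" else "B")
  else
  if nuance = "Proud" then (if micro ∈ (["Accomplished", "Honored", "Esteemed", "Fulfilled"] : List String) then "C" else "B")
  else
  if nuance = "Respected" then (if micro ∈ (["Valued", "Trusted", "Admired", "Recognized"] : List String) then "C" else "B")
  else
  if nuance = "Courageous" then (if micro ∈ (["Brave", "Adventurous", "Daring", "Fearless"] : List String) then "C" else "B")
  else
  "B"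

def assign_tier_alt (core : String) (nuance : String) (micro : String) : String :=
  if core = "Sad" then sadTier nuance micro
  else
  if core = "Fearful" then fearfulTier nuance micro
  else
  if core = "Angry" then angryTier nuance micro
  else
  if core = "Peaceful" then peacefulTier nuance micro
  else
  if core = "Happy" then happyTier nuance micro
  else
  if core = "Strong" then strongTier nuance micro
  else
  "B"

-- ===== PRECONDITION & SPEC =====
def Spec_assign_tier (core : String) (nuance : String) (micro : String) (out : String) : Prop := out = assign_tier_alt core nuance micro
instance (core : String) (nuance : String) (micro : String) (out : String) : Decidable (Spec_assign_tier core nuance micro out) := by unfold Spec_assign_tier; infer_instance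

-- ===== CLAIM (what is proved, stated in full; the proofs are below) =====
def Claim_equal_assign_tier : Prop := ∀ (core : String) (nuance : String) (micro : String), Dom_assign_tier core nuance micro → Spec_assign_tier core nuance micro (assign_tier core nuance micro)

-- ===== LEMMAS AND PROOFS =====
-- The proof is an exhaustive case split on the finitely many core/nuance literals either program
-- tests; each leaf reduces both programs by simp.

-- ===== VERDICT (by name: the statement is the Claim_ definition above) =====
theorem assign_tier_spec : Claim_equal_assign_tier := by
  intro core nuance micro _
  unfold Spec_assign_tier
  by_cases hc0 : core = "Sad"
  · -- core = Sad
    by_cases hn0_0 : nuance = "Lonely"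
    · simp_all [assign_tier, assign_tier_alt, tierALoop, tierCLoop, tierAPatterns, tierCPatterns, sadTier, fearfulTier, angryTier, peacefulTier, happyTier, strongTier]
    ·
      by_cases hn0_1 : nuance = "Depressed"
      · simp_all [assign_tier, assign_tier_alt, tierALoop, tierCLoop, tierAPatterns, tierCPatterns, sadTier, fearfulTier, angryTier, peacefulTier, happyTier, strongTier]
      ·
        by_cases hn0_2 : nuance = "Hurt"
        · simp_all [assign_tier, assign_tier_alt, tierALoop, tierCLoop, tierAPatterns, tierCPatterns, sadTier, fearfulTier, angryTier, peacefulTier, happyTier, strongTier]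
        ·
          by_cases hn0_3 : nuance = "Vulnerable"
          · simp_all [assign_tier, assign_tier_alt, tierALoop, tierCLoop, tierAPatterns, tierCPatterns, sadTier, fearfulTier, angryTier, peacefulTier, happyTier, strongTier]
          ·
            by_cases hn0_4 : nuance = "Guilty"
            · simp_all [assign_tier, assign_tier_alt, tierALoop, tierCLoop, tierAPatterns, tierCPatterns, sadTier, fearfulTier, angryTier, peacefulTier, happyTier, strongTier]
            ·
              by_cases hn0_5 : nuance = "Grief"
              · simp_all [assign_tier, assign_tier_alt, tierALoop, tierCLoop, tierAPatterns, tierCPatterns, sadTier, fearfulTier, angryTier, peacefulTier, happyTier, strongTier]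
              ·
                simp_all [assign_tier, assign_tier_alt, tierALoop, tierCLoop, tierAPatterns, tierCPatterns, sadTier, fearfulTier, angryTier, peacefulTier, happyTier, strongTier]
  ·
    by_cases hc1 : core = "Fearful"
    · -- core = Fearful
      by_cases hn1_0 : nuance = "Anxious"
      · simp_all [assign_tier, assign_tier_alt, tierALoop, tierCLoop, tierAPatterns, tierCPatterns, sadTier, fearfulTier, angryTier, peacefulTier, happyTier, strongTier]
      ·
        by_cases hn1_1 : nuance = "Overwhelmed"
        · simp_all [assign_tier, assign_tier_alt, tierALoop, tierCLoop, tierAPatterns, tierCPatterns, sadTier, fearfulTier, angryTier, peacefulTier, happyTier, strongTier]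
        ·
          by_cases hn1_2 : nuance = "Insecure"
          · simp_all [assign_tier, assign_tier_alt, tierALoop, tierCLoop, tierAPatterns, tierCPatterns, sadTier, fearfulTier, angryTier, peacefulTier, happyTier, strongTier]
          ·
            by_cases hn1_3 : nuance = "Rejected"
            · simp_all [assign_tier, assign_tier_alt, tierALoop, tierCLoop, tierAPatterns, tierCPatterns, sadTier, fearfulTier, angryTier, peacefulTier, happyTier, strongTier]
            ·
              by_cases hn1_4 : nuance = "Weak"
              · simp_all [assign_tier, assign_tier_alt, tierALoop, tierCLoop, tierAPatterns, tierCPatterns, sadTier, fearfulTier, angryTier, peacefulTier, happyTier, strongTier]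
              ·
                by_cases hn1_5 : nuance = "Helpless"
                · simp_all [assign_tier, assign_tier_alt, tierALoop, tierCLoop, tierAPatterns, tierCPatterns, sadTier, fearfulTier, angryTier, peacefulTier, happyTier, strongTier]
                ·
                  simp_all [assign_tier, assign_tier_alt, tierALoop, tierCLoop, tierAPatterns, tierCPatterns, sadTier, fearfulTier, angryTier, peacefulTier, happyTier, strongTier]
    ·
      by_cases hc2 : core = "Angry"
      · -- core = Angry
        by_cases hn2_0 : nuance = "Frustrated"
        · simp_all [assign_tier, assign_tier_alt, tierALoop, tierCLoop, tierAPatterns, tierCPatterns, sadTier, fearfulTier, angryTier, peacefulTier, happyTier, strongTier]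
        ·
          by_cases hn2_1 : nuance = "Disappointed"
          · simp_all [assign_tier, assign_tier_alt, tierALoop, tierCLoop, tierAPatterns, tierCPatterns, sadTier, fearfulTier, angryTier, peacefulTier, happyTier, strongTier]
          ·
            by_cases hn2_2 : nuance = "Humiliated"
            · simp_all [assign_tier, assign_tier_alt, tierALoop, tierCLoop, tierAPatterns, tierCPatterns, sadTier, fearfulTier, angryTier, peacefulTier, happyTier, strongTier]
            ·
              by_cases hn2_3 : nuance = "Aggressive"
              · simp_all [assign_tier, assign_tier_alt, tierALoop, tierCLoop, tierAPatterns, tierCPatterns, sadTier, fearfulTier, angryTier, peacefulTier, happyTier, strongTier]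
              ·
                by_cases hn2_4 : nuance = "Critical"
                · simp_all [assign_tier, assign_tier_alt, tierALoop, tierCLoop, tierAPatterns, tierCPatterns, sadTier, fearfulTier, angryTier, peacefulTier, happyTier, strongTier]
                ·
                  simp_all [assign_tier, assign_tier_alt, tierALoop, tierCLoop, tierAPatterns, tierCPatterns, sadTier, fearfulTier, angryTier, peacefulTier, happyTier, strongTier]
      ·
        by_cases hc3 : core = "Peaceful"
        · -- core = Peaceful
          by_cases hn3_0 : nuance = "Grateful"
          · simp_all [assign_tier, assign_tier_alt, tierALoop, tierCLoop, tierAPatterns, tierCPatterns, sadTier, fearfulTier, angryTier, peacefulTier, happyTier, strongTier]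
          ·
            by_cases hn3_1 : nuance = "Content"
            · simp_all [assign_tier, assign_tier_alt, tierALoop, tierCLoop, tierAPatterns, tierCPatterns, sadTier, fearfulTier, angryTier, peacefulTier, happyTier, strongTier]
            ·
              by_cases hn3_2 : nuance = "Serene"
              · simp_all [assign_tier, assign_tier_alt, tierALoop, tierCLoop, tierAPatterns, tierCPatterns, sadTier, fearfulTier, angryTier, peacefulTier, happyTier, strongTier]
              ·
                simp_all [assign_tier, assign_tier_alt, tierALoop, tierCLoop, tierAPatterns, tierCPatterns, sadTier, fearfulTier, angryTier, peacefulTier, happyTier, strongTier]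
        ·
          by_cases hc4 : core = "Happy"
          · -- core = Happy
            by_cases hn4_0 : nuance = "Optimistic"
            · simp_all [assign_tier, assign_tier_alt, tierALoop, tierCLoop, tierAPatterns, tierCPatterns, sadTier, fearfulTier, angryTier, peacefulTier, happyTier, strongTier]
            ·
              by_cases hn4_1 : nuance = "Interested"
              · simp_all [assign_tier, assign_tier_alt, tierALoop, tierCLoop, tierAPatterns, tierCPatterns, sadTier, fearfulTier, angryTier, peacefulTier, happyTier, strongTier]
              ·
                by_cases hn4_2 : nuance = "Excited"
                · simp_all [assign_tier, assign_tier_alt, tierALoop, tierCLoop, tierAPatterns, tierCPatterns, sadTier, fearfulTier, angryTier, peacefulTier, happyTier, strongTier]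
                ·
                  by_cases hn4_3 : nuance = "Playful"
                  · simp_all [assign_tier, assign_tier_alt, tierALoop, tierCLoop, tierAPatterns, tierCPatterns, sadTier, fearfulTier, angryTier, peacefulTier, happyTier, strongTier]
                  ·
                    simp_all [assign_tier, assign_tier_alt, tierALoop, tierCLoop, tierAPatterns, tierCPatterns, sadTier, fearfulTier, angryTier, peacefulTier, happyTier, strongTier]
          ·
            by_cases hc5 : core = "Strong"
            · -- core = Strong
              by_cases hn5_0 : nuance = "Resilient"
              · simp_all [assign_tier, assign_tier_alt, tierALoop, tierCLoop, tierAPatterns, tierCPatterns, sadTier, fearfulTier, angryTier, peacefulTier, happyTier, strongTier]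
              ·
                by_cases hn5_1 : nuance = "Hopeful"
                · simp_all [assign_tier, assign_tier_alt, tierALoop, tierCLoop, tierAPatterns, tierCPatterns, sadTier, fearfulTier, angryTier, peacefulTier, happyTier, strongTier]
                ·
                  by_cases hn5_2 : nuance = "Confident"
                  · simp_all [assign_tier, assign_tier_alt, tierALoop, tierCLoop, tierAPatterns, tierCPatterns, sadTier, fearfulTier, angryTier, peacefulTier, happyTier, strongTier]
                  ·
                    by_cases hn5_3 : nuance = "Proud"
                    · simp_all [assign_tier, assign_tier_alt, tierALoop, tierCLoop, tierAPatterns, tierCPatterns, sadTier, fearfulTier, angryTier, peacefulTier, happyTier, strongTier]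
                    ·
                      by_cases hn5_4 : nuance = "Respected"
                      · simp_all [assign_tier, assign_tier_alt, tierALoop, tierCLoop, tierAPatterns, tierCPatterns, sadTier, fearfulTier, angryTier, peacefulTier, happyTier, strongTier]
                      ·
                        by_cases hn5_5 : nuance = "Courageous"
                        · simp_all [assign_tier, assign_tier_alt, tierALoop, tierCLoop, tierAPatterns, tierCPatterns, sadTier, fearfulTier, angryTier, peacefulTier, happyTier, strongTier]
                        ·
                          simp_all [assign_tier, assign_tier_alt, tierALoop, tierCLoop, tierAPatterns, tierCPatterns, sadTier, fearfulTier, angryTier, peacefulTier, happyTier, strongTier]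
            ·
              simp_all [assign_tier, assign_tier_alt, tierALoop, tierCLoop, tierAPatterns, tierCPatterns, sadTier, fearfulTier, angryTier, peacefulTier, happyTier, strongTier]
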